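-- pv_equiv track=rewrite | github.com/duanbibo/test_demo | case/shujvjiegou/zifuchuan.py | parse
-- ===== SOURCE A (Python) =====
-- def parse(n):
--       if len(n)==1:
--         return '0.0' + str(n)
--       elif len(n) ==2:
--          return '0.' + str(n)
--       else:
--          l = n[0:-2]
--          lis = []
--          for i in range(len(l),0,-3):  # 关键这一部，i的取值是每隔3个数来取的
--             if i >3:
--                   lis.append(l[i-3:i])
--             else:
--                   lis.append(l[0:i])
--       lis=list(reversed(lis))
--       return ','.join(lis)+'.'+n[-2:]
-- ===== SOURCE B (Python) =====
-- def parse(n):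
--     if len(n) == 1:
--         return '0.0' + str(n)
--     elif len(n) == 2:
--         return '0.' + str(n)
--     s = n[:-2]
--     grouped = ''
--     while len(s) > 3:
--         grouped = ',' + s[-3:] + grouped
--         s = s[:-3]
--     return s + grouped + '.' + n[-2:]
-- ===== Notes on version B (the rewrite author's own statement) =====
-- stated objective: alternative
-- what changed: A precomputes a step -3 countdown range of indices and foldl-appends 3-wide slices into a list that is then reversed and comma-joined; B instead peels 3-character groups off the right end of the integer part in a while loop, prepending each with a comma to a string accumulator, with no index range, no list, no reversal and no join.
import Mathlib
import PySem

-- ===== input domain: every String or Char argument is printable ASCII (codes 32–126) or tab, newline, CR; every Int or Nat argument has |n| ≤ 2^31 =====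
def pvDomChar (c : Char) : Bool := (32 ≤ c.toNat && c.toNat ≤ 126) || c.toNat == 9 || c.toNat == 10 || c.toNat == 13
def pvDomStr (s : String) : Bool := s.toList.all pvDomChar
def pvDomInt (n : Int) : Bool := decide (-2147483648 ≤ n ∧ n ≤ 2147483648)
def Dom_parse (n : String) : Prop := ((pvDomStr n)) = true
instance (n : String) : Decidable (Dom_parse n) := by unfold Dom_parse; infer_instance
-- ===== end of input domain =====

-- B replaces A's countdown-range slicing + list + reverse + join by a while loop that peels
-- 3-character groups off the right end into a prepended string accumulator; objective: alternative, same result.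

-- ===== PORT A =====
def parse (n : String) : String :=
  let cs := n.toList
  if cs.length = 1 then String.ofList ('0' :: '.' :: '0' :: cs)
  else if cs.length = 2 then String.ofList ('0' :: '.' :: cs)
  else
    let l := PySem.List.slice cs (some 0) (some (-2))
    let lis : List (List Char) :=
      (PySem.List.pyRange (l.length : Int) 0 (-3)).foldl
        (fun lis i =>
          if i > 3 then lis ++ [PySem.List.slice l (some (i - 3)) (some i)]
          else lis ++ [PySem.List.slice l (some 0) (some i)]) []
    let lis := lis.reverse
    String.ofList (PySem.Chars.join [','] lis ++ ['.'] ++ PySem.List.slice cs (some (-2)) none)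

-- ===== PORT B =====
-- the while loop: s, grouped are the two mutable strings; each round peels s[-3:] off s
def groupLoop (s grouped : List Char) : List Char :=
  if 3 < s.length then
    groupLoop (PySem.List.slice s none (some (-3)))
      (',' :: (PySem.List.slice s (some (-3)) none ++ grouped))
  else s ++ grouped
termination_by s.length
decreasing_by
  rw [PySem.List.slice_to_neg_ofNat s 3 (by omega)]
  simp only [List.length_take]
  omega

def parse_alt (n : String) : String :=
  let cs := n.toList
  if cs.length = 1 then String.ofList ('0' :: '.' :: '0' :: cs)
  else if cs.length = 2 then String.ofList ('0' :: '.' :: cs)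
  else
    let s := PySem.List.slice cs none (some (-2))
    String.ofList (groupLoop s [] ++ '.' :: PySem.List.slice cs (some (-2)) none)

-- ===== PRECONDITION & SPEC =====
def Spec_parse (n : String) (out : String) : Prop := out = parse_alt n
instance (n : String) (out : String) : Decidable (Spec_parse n out) := by unfold Spec_parse; infer_instance

-- ===== CLAIM (what is proved, stated in full; the proofs are below) =====
def Claim_equal_parse : Prop := ∀ (n : String), Dom_parse n → Spec_parse n (parse n)

-- ===== LEMMAS AND PROOFS =====

-- the reversed integer part split into 3-char groups from the front
def chunks3 : List Char → List (List Char)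
  | [] => []
  | [a] => [[a]]
  | [a, b] => [[a, b]]
  | a :: b :: c :: t => [a, b, c] :: chunks3 t

-- A's slice picker for index i of the countdown range
def gA (l : List Char) (i : Int) : List Char :=
  if i > 3 then PySem.List.slice l (some (i - 3)) (some i)
  else PySem.List.slice l (some 0) (some i)

-- the common normal form: A's joined groups, and what groupLoop builds
def J (l : List Char) : List Char :=
  PySem.Chars.join [','] (((chunks3 l.reverse).map List.reverse).reverse)

lemma pyRange_neg3_nil (a b : Int) (h : a ≤ b) : PySem.List.pyRange a b (-3) = [] := by
  simp only [PySem.List.pyRange]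
  norm_num
  intro hba
  omega

lemma pyRange_neg3_cons (a b : Int) (h : b < a) :
    PySem.List.pyRange a b (-3) = a :: PySem.List.pyRange (a - 3) b (-3) := by
  simp only [PySem.List.pyRange]
  norm_num
  rw [if_pos h]
  by_cases h2 : b < a - 3
  · rw [if_pos h2]
    have hc : ((a - b + 3 - 1) / 3).toNat = ((a - 3 - b + 3 - 1) / 3).toNat + 1 := by
      omega
    rw [hc, List.range_succ_eq_map]
    simp only [List.map_cons, List.map_map, List.cons.injEq]
    refine ⟨by push_cast; ring, List.map_congr_left ?_⟩
    intro k _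
    simp only [Function.comp_apply]
    push_cast
    ring
  · rw [if_neg h2]
    have hc : ((a - b + 3 - 1) / 3).toNat = 1 := by omega
    rw [hc]
    simp

lemma slice_front (xs ext : List Char) (i : Nat) (hi : i ≤ xs.length) :
    PySem.List.slice (xs ++ ext) none (some (i : Int)) = PySem.List.slice xs none (some (i : Int)) := by
  rw [PySem.List.slice_to_natCast, PySem.List.slice_to_natCast, List.take_append_of_le_length hi]

lemma slice_mid (xs ext : List Char) (a b : Nat) (hb : b ≤ xs.length) :
    PySem.List.slice (xs ++ ext) (some (a : Int)) (some (b : Int))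
      = PySem.List.slice xs (some (a : Int)) (some (b : Int)) := by
  rw [PySem.List.slice_natCast, PySem.List.slice_natCast]
  by_cases ha : a ≤ xs.length
  · rw [List.drop_append_of_le_length ha]
    rw [List.take_append_of_le_length (by simp; omega)]
  · have h1 : b ≤ a := by omega
    have h2 : b - a = 0 := by omega
    simp [h2]

-- A's slice list, generalized over junk appended after the digits being grouped
lemma lemA (r : List Char) : ∀ (ext : List Char),
    (PySem.List.pyRange ((r.length : Int)) 0 (-3)).map (gA (r.reverse ++ ext))
      = (chunks3 r).map List.reverse := by
  induction r using chunks3.induct with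
  | case1 =>
      intro ext
      simp only [List.length_nil, Nat.cast_zero, pyRange_neg3_nil 0 0 le_rfl,
        List.map_nil, chunks3]
  | case2 a =>
      intro ext
      rw [show ((([a] : List Char).length : Int)) = 1 by simp,
          pyRange_neg3_cons 1 0 (by norm_num), pyRange_neg3_nil (1 - 3) 0 (by norm_num)]
      simp only [List.map_cons, List.map_nil, chunks3, gA]
      rw [if_neg (by norm_num), PySem.List.slice_zero_start,
          show (1 : Int) = ((1 : Nat) : Int) by norm_num,
          slice_front [a].reverse ext 1 (by simp),
          PySem.List.slice_to_natCast]
      simp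
  | case3 a b =>
      intro ext
      rw [show ((([a, b] : List Char).length : Int)) = 2 by simp,
          pyRange_neg3_cons 2 0 (by norm_num), pyRange_neg3_nil (2 - 3) 0 (by norm_num)]
      simp only [List.map_cons, List.map_nil, chunks3, gA]
      rw [if_neg (by norm_num), PySem.List.slice_zero_start,
          show (2 : Int) = ((2 : Nat) : Int) by norm_num,
          slice_front [a, b].reverse ext 2 (by simp),
          PySem.List.slice_to_natCast]
      simp
  | case4 a b c t ih =>
      intro ext
      have hlen : (((a :: b :: c :: t).length : Int)) = (t.length : Int) + 3 := by
        simp; omega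
      have hrev : (a :: b :: c :: t).reverse ++ ext = t.reverse ++ ([c, b, a] ++ ext) := by
        simp
      rw [hlen, hrev, pyRange_neg3_cons ((t.length : Int) + 3) 0 (by positivity)]
      have hstep : (t.length : Int) + 3 - 3 = (t.length : Int) := by ring
      rw [hstep]
      simp only [List.map_cons, chunks3, List.cons.injEq]
      refine ⟨?_, ih ([c, b, a] ++ ext)⟩
      · by_cases ht : 0 < t.length
        · simp only [gA, if_pos (show (t.length : Int) + 3 > 3 by omega)]
          have h1 : (t.length : Int) + 3 - 3 = ((t.length : Nat) : Int) := by ring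
          have h2 : (t.length : Int) + 3 = (((t.length + 3 : Nat)) : Int) := by push_cast; ring
          rw [h1, h2, ← List.append_assoc,
              slice_mid (t.reverse ++ [c, b, a]) ext t.length (t.length + 3) (by simp),
              PySem.List.slice_natCast, List.drop_append_of_le_length (by simp),
              show t.length + 3 - t.length = 3 by omega]
          simp [List.drop_of_length_le]
        · have ht0 : t = [] := List.eq_nil_of_length_eq_zero (by omega)
          subst ht0
          simp only [List.length_nil, Nat.cast_zero, List.reverse_nil, List.nil_append, gA]
          rw [if_neg (by norm_num), PySem.List.slice_zero_start,
              PySem.List.slice_to _ (by norm_num)]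
          simp

lemma join_snoc (cs : List (List Char)) (z : List Char) (h : cs ≠ []) :
    PySem.Chars.join [','] (cs ++ [z]) = PySem.Chars.join [','] cs ++ [','] ++ z := by
  induction cs with
  | nil => exact absurd rfl h
  | cons x cs ih =>
      cases cs with
      | nil => simp [PySem.Chars.join_cons_cons, PySem.Chars.join_singleton]
      | cons y cs =>
          simp only [List.cons_append] at ih ⊢
          rw [PySem.Chars.join_cons_cons, PySem.Chars.join_cons_cons, ih (by simp)]
          simp

lemma chunks3_ne_nil (xs : List Char) (h : xs ≠ []) : chunks3 xs ≠ [] := by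
  cases xs with
  | nil => exact absurd rfl h
  | cons a t =>
    cases t with
    | nil => simp [chunks3]
    | cons b t =>
      cases t with
      | nil => simp [chunks3]
      | cons c t => simp [chunks3]

lemma chunks3_append3 (u t : List Char) (h : u.length = 3) :
    chunks3 (u ++ t) = u :: chunks3 t := by
  match u, h with
  | [a, b, c], _ => simp [chunks3]

-- J of a short list is the list itself
lemma J_short (l : List Char) (h : l.length ≤ 3) : J l = l := by
  match l, h with
  | [], _ => simp [J, chunks3, PySem.Chars.join_nil]
  | [a], _ => simp [J, chunks3, PySem.Chars.join_singleton]
  | [a, b], _ => simp [J, chunks3, PySem.Chars.join_singleton]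
  | [a, b, c], _ => simp [J, chunks3, PySem.Chars.join_singleton]

-- the peel step: J (take (len-3) l) ++ ',' :: drop (len-3) l = J l
lemma J_peel (l : List Char) (h : 3 < l.length) :
    J l = J (l.take (l.length - 3)) ++ ',' :: l.drop (l.length - 3) := by
  set p := l.take (l.length - 3) with hp
  set d := l.drop (l.length - 3) with hd
  have hdl : d.length = 3 := by simp [hd]; omega
  have hpl : p ≠ [] := by
    have : p.length = l.length - 3 := by simp [hp]
    intro h0
    rw [h0] at this
    simp at this
    omega
  have hrev : l.reverse = d.reverse ++ p.reverse := by
    rw [hp, hd, ← List.reverse_append, List.take_append_drop]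
  have hc : chunks3 l.reverse = d.reverse :: chunks3 p.reverse := by
    rw [hrev, chunks3_append3 _ _ (by simp [hdl])]
  unfold J
  rw [hc]
  simp only [List.map_cons, List.reverse_cons, List.reverse_reverse]
  rw [join_snoc _ _ (by
      simp only [ne_eq, List.reverse_eq_nil_iff, List.map_eq_nil_iff]
      exact chunks3_ne_nil _ (by simpa using hpl))]
  simp

-- groupLoop computes J with the accumulator appended
lemma groupLoop_eq (s grouped : List Char) : groupLoop s grouped = J s ++ grouped := by
  induction s, grouped using groupLoop.induct with
  | case1 s grouped h ih =>
      rw [groupLoop, if_pos h, ih,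
          PySem.List.slice_to_neg_ofNat s 3 (by omega),
          PySem.List.slice_from_neg_ofNat s 3 (by omega),
          J_peel s h]
      simp
  | case2 s grouped h =>
      rw [groupLoop, if_neg h, J_short s (by omega)]

-- ===== VERDICT (by name: the statement is the Claim_ definition above) =====
theorem parse_spec : Claim_equal_parse := by
  intro n _
  unfold Spec_parse parse parse_alt
  by_cases h1 : n.toList.length = 1
  · simp only [if_pos h1]
  · by_cases h2 : n.toList.length = 2
    · simp only [if_neg h1, if_pos h2]
    · simp only [if_neg h1, if_neg h2]
      rw [PySem.List.slice_zero_start]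
      set l := PySem.List.slice n.toList none (some (-2)) with hl
      have hfA : (fun (lis : List (List Char)) (i : Int) =>
            if i > 3 then lis ++ [PySem.List.slice l (some (i - 3)) (some i)]
            else lis ++ [PySem.List.slice l (some 0) (some i)])
          = fun lis i => lis ++ [gA l i] := by
        funext lis i
        simp only [gA]
        split <;> rfl
      rw [hfA, PySem.List.foldl_append_singleton_eq_map, List.nil_append]
      have h1 := lemA l.reverse []
      rw [List.reverse_reverse, List.append_nil, List.length_reverse] at h1
      rw [h1, groupLoop_eq, List.append_nil]
      simp only [J]
      simp
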